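-- pv_equiv track=rewrite | github.com/dlwndmssla/BaejoonHub | 백준/Silver/20125. 쿠키의 신체 측정/쿠키의 신체 측정.py | check_legs
-- ===== SOURCE A (Python) =====
-- def check_legs(cookie,heart,waist):
--     leg_lengths = []
--     trans_legs = [list(i) for i in zip(*cookie[heart[0]+waist[0]+1:][::-1])]
--     for leg in trans_legs:
--         leg_length = leg.count('*')
--         if not leg_length: continue
--         leg_lengths.append(leg_length)
--
--     return leg_lengths
-- ===== SOURCE B (Python) =====
-- def check_legs(cookie, heart, waist):
--     # Row-major single pass with a running per-column counter (no transpose, no reversal)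
--     sub = cookie[heart[0] + waist[0] + 1:]
--     if not sub:
--         return []
--     w = min(len(r) for r in sub)
--     counts = [0] * w
--     for row in sub:
--         counts = [c + (ch == '*') for c, ch in zip(counts, row)]
--     return [c for c in counts if c]
-- ===== Notes on version B (the rewrite author's own statement) =====
-- stated objective: alternative
-- what changed: Replaces the reverse-then-transpose (zip(*sub[::-1])) plus per-column count with a single row-major pass that maintains a running per-column counter vector (zip rows with the counts, truncated to the shortest row), then filters zeros.
import Mathlib
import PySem

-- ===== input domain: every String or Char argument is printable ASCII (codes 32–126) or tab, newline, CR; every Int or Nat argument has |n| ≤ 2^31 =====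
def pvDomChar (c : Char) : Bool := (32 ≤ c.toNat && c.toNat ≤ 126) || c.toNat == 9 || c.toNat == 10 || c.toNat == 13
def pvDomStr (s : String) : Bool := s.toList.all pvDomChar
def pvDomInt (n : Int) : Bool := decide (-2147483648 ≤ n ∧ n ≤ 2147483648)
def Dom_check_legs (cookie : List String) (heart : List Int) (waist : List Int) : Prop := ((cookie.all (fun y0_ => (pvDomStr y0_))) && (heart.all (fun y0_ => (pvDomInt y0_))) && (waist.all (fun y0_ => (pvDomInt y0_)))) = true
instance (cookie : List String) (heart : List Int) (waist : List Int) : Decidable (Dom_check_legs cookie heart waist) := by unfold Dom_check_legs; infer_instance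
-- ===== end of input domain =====

-- B replaces A's reverse-then-transpose (zip(*sub[::-1])) with a single row-major pass
-- keeping a running per-column counter vector; same result, alternative structure (no speed claim).

-- ===== PORT A =====
-- zip(*rows): columns 0..w-1 where w is the minimum row length (zip truncates to the
-- shortest iterable); exact hand port of zip(*...) on lists of chars.
def pyZipStar (rows : List (List Char)) : List (List Char) :=
  let w : Nat := ((PySem.List.min? (rows.map List.length) (fun x => x)).getD 0)
  (List.range w).map (fun j => rows.map (fun r => r.getD j ' '))

def check_legs (cookie : List String) (heart : List Int) (waist : List Int) : List Int :=
  -- heart[0], waist[0]: pyGetD, valid under Pre_ (heart ≠ [], waist ≠ [])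
  let start := PySem.List.pyGetD heart 0 0 + PySem.List.pyGetD waist 0 0 + 1
  -- cookie[start:][::-1]  ([::-1] is reverse, PySem.List.slice?_none_none_neg_one)
  let trans_legs := pyZipStar (((PySem.List.slice cookie (some start) none).reverse).map String.toList)
  trans_legs.foldl (fun acc leg =>
    if ((leg.count '*' : Nat) : Int) = 0 then acc else acc ++ [((leg.count '*' : Nat) : Int)]) []

-- ===== PORT B =====
def check_legs_alt (cookie : List String) (heart : List Int) (waist : List Int) : List Int :=
  let start := PySem.List.pyGetD heart 0 0 + PySem.List.pyGetD waist 0 0 + 1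
  let sub := (PySem.List.slice cookie (some start) none).map String.toList
  match sub with
  | [] => []
  | r0 :: rs =>
    let w : Nat := ((PySem.List.min? ((r0 :: rs).map List.length) (fun x => x)).getD 0)
    let counts : List Int :=
      (r0 :: rs).foldl
        (fun counts row => (counts.zip row).map (fun p => p.1 + (if p.2 = '*' then 1 else 0)))
        (List.replicate w 0)
    counts.filter (fun c => decide (c ≠ 0))

-- ===== PRECONDITION & SPEC =====
-- Pre_ excludes exactly the inputs on which A raises IndexError: heart[0]/waist[0] on an empty list.
def Pre_check_legs (cookie : List String) (heart : List Int) (waist : List Int) : Prop :=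
  heart ≠ [] ∧ waist ≠ []
instance (cookie : List String) (heart : List Int) (waist : List Int) : Decidable (Pre_check_legs cookie heart waist) := by unfold Pre_check_legs; infer_instance

def pvWitness_check_legs : List String × List Int × List Int := (["***", "* *"], [0], [0])

def Spec_check_legs (cookie : List String) (heart : List Int) (waist : List Int) (out : List Int) : Prop := out = check_legs_alt cookie heart waist
instance (cookie : List String) (heart : List Int) (waist : List Int) (out : List Int) : Decidable (Spec_check_legs cookie heart waist out) := by unfold Spec_check_legs; infer_instance

-- ===== CLAIM (what is proved, stated in full; the proofs are below) =====
def Claim_equal_check_legs : Prop := ∀ (cookie : List String) (heart : List Int) (waist : List Int), Dom_check_legs cookie heart waist → Pre_check_legs cookie heart waist → Spec_check_legs cookie heart waist (check_legs cookie heart waist)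

-- ===== LEMMAS AND PROOFS =====

-- min over a reversed Nat list has the same value (min? returns the first minimum,
-- but the minimal VALUE is unique)
lemma pv_min_getD_reverse (xs : List Nat) :
    (PySem.List.min? xs.reverse (fun x => x)).getD 0 = (PySem.List.min? xs (fun x => x)).getD 0 := by
  rcases h1 : PySem.List.min? xs.reverse (fun x => x) with _ | m1
  · have hx : xs = [] := by simpa using (PySem.List.min?_eq_none_iff _ _).mp h1
    rw [hx]; simp [PySem.List.min?]
  · rcases h2 : PySem.List.min? xs (fun x => x) with _ | m2
    · have hx : xs = [] := (PySem.List.min?_eq_none_iff _ _).mp h2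
      rw [hx] at h1; simp [PySem.List.min?] at h1
    · have hm1 : m1 ∈ xs := List.mem_reverse.mp (PySem.List.min?_mem h1)
      have hm2 : m2 ∈ xs.reverse := List.mem_reverse.mpr (PySem.List.min?_mem h2)
      have i1 := PySem.List.min?_isMin h1 m2 hm2
      have i2 := PySem.List.min?_isMin h2 m1 hm1
      simpa using Nat.le_antisymm i1 i2

-- zipping a length-w list (written as a map over range) with a row of length ≥ w
lemma pv_zip_map_range {α : Type} (g : Nat → α) (w : Nat) (r : List Char) (h : w ≤ r.length) :
    ((List.range w).map g).zip r = (List.range w).map (fun j => (g j, r.getD j ' ')) := by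
  apply List.ext_getElem
  · simp; omega
  · intro j h1 h2
    have hj : j < w := by simpa using h2
    have hjr : j < r.length := lt_of_lt_of_le hj h
    simp [List.getElem_zip, List.getD, hjr]

-- B's row-major fold computes, per column j, the count of '*' among the rows
lemma pv_counts_fold (rows : List (List Char)) (w : Nat) (g : Nat → Int)
    (h : ∀ r ∈ rows, w ≤ r.length) :
    rows.foldl
      (fun counts row => (counts.zip row).map (fun p => p.1 + (if p.2 = '*' then 1 else 0)))
      ((List.range w).map g)
    = (List.range w).map
        (fun j => g j + (((rows.map (fun r => r.getD j ' ')).count '*' : Nat) : Int)) := by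
  induction rows generalizing g with
  | nil => simp
  | cons r rs ih =>
    have hr : w ≤ r.length := h r (by simp)
    have hrs : ∀ r' ∈ rs, w ≤ r'.length := fun r' hr' => h r' (by simp [hr'])
    simp only [List.foldl_cons]
    rw [pv_zip_map_range g w r hr, List.map_map]
    have hc : ((fun p : Int × Char => p.1 + if p.2 = '*' then 1 else 0) ∘
          fun j => (g j, r.getD j ' '))
        = fun j => g j + (if r.getD j ' ' = '*' then 1 else 0) := by
      funext j; simp
    rw [hc, ih (fun j => g j + (if r.getD j ' ' = '*' then 1 else 0)) hrs]
    apply List.map_congr_left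
    intro j _
    simp [List.count_cons]
    split_ifs <;> ring

-- ===== VERDICT (by name: the statement is the Claim_ definition above) =====
theorem check_legs_spec : Claim_equal_check_legs := by
  intro cookie heart waist _ _
  unfold Spec_check_legs check_legs check_legs_alt pyZipStar
  dsimp only
  rw [List.map_reverse]
  generalize List.map String.toList
      (PySem.List.slice cookie
        (some (PySem.List.pyGetD heart 0 0 + PySem.List.pyGetD waist 0 0 + 1)) none) = S
  -- A's loop: 'if not c: continue; out.append(c)' is 'if c ≠ 0: out.append(c)'
  have flip : (fun (acc : List Int) (leg : List Char) =>
        if ((leg.count '*' : Nat) : Int) = 0 then acc else acc ++ [((leg.count '*' : Nat) : Int)])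
      = (fun acc leg =>
        if ¬ (((leg.count '*' : Nat) : Int) = 0) then acc ++ [((leg.count '*' : Nat) : Int)] else acc) := by
    funext acc leg; rw [ite_not]
  rw [flip, PySem.List.foldl_append_ite, List.nil_append]
  rw [show (fun (x : List Char) => decide (¬ ((x.count '*' : Nat) : Int) = 0))
        = ((fun (c : Int) => decide (c ≠ 0)) ∘ (fun (leg : List Char) => ((leg.count '*' : Nat) : Int)))
      from rfl]
  rw [← List.filter_map, List.map_map]
  cases S with
  | nil => simp [PySem.List.min?]
  | cons r0 rs =>
    dsimp only
    rw [show List.map List.length (r0 :: rs).reverse = (List.map List.length (r0 :: rs)).reverse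
        from List.map_reverse ..]
    rw [pv_min_getD_reverse]
    rcases hm : PySem.List.min? ((r0 :: rs).map List.length) (fun x => x) with _ | m
    · exact absurd ((PySem.List.min?_eq_none_iff _ _).mp hm) (by simp)
    · have hlen : ∀ r ∈ (r0 :: rs), m ≤ r.length := fun r hr =>
        PySem.List.min?_isMin hm r.length (List.mem_map_of_mem hr)
      simp only [Option.getD_some]
      -- the columns of the reversed rows have the same '*'-count
      have hcols : (List.range m).map
            ((fun leg => ((leg.count '*' : Nat) : Int)) ∘
              (fun j => (r0 :: rs).reverse.map (fun r => r.getD j ' ')))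
          = (List.range m).map
            (fun j => ((((r0 :: rs).map (fun r => r.getD j ' ')).count '*' : Nat) : Int)) := by
        apply List.map_congr_left
        intro j _
        simp [Function.comp, List.map_reverse, List.count_reverse, List.count_cons]
      rw [hcols]
      have hrepl : List.replicate m (0 : Int) = (List.range m).map (fun _ => 0) := by
        simp [List.map_const']
      rw [hrepl, pv_counts_fold (r0 :: rs) m (fun _ => 0) hlen]
      simp
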